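-- pv_equiv track=rewrite | github.com/Solbjor/CodePathQuestions | session_one.py | navigate_research_station
-- ===== SOURCE A (Python) =====
-- def navigate_research_station(station_layout, observations):
--     # Step 1: Create a dictionary that maps each observation point (character)
--     # to its index in the station layout
--     my_dict = {}
--     for index, char in enumerate(station_layout):
--         my_dict[char] = index
--
--     # Step 2: Initialize total time and the current index (starting at index 0)
--     total_sum = 0
--     index = 0
--
--     # Step 3: Loop through each observation point in the order given
--     for char in observations:
--         if char in my_dict:
--             # Add the time it takes to move from current location to the target observation point
--             total_sum += abs(index - my_dict[char])
--             # Update current index to new location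
--             index = my_dict[char]
--
--     # Step 4: Return the total time after completing all movements
--     return total_sum
-- ===== SOURCE B (Python) =====
-- def navigate_research_station(station_layout, observations):
--     # Map each character to its LAST index in the layout.
--     last = {}
--     for i, c in enumerate(station_layout):
--         last[c] = i
--     # Sweep / difference-array algorithm: each move from pos to j contributes
--     # +1 to every unit cell [x, x+1) with min <= x < max; record that as a
--     # difference dict (+1 at lo, -1 at hi), then a single prefix-sum sweep over
--     # the cells adds each move's span length exactly once.
--     delta = {}
--     pos = 0
--     for c in observations:
--         if c in last:
--             j = last[c]
--             lo, hi = (pos, j) if pos <= j else (j, pos)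
--             delta[lo] = delta.get(lo, 0) + 1
--             delta[hi] = delta.get(hi, 0) - 1
--             pos = j
--     total = 0
--     running = 0
--     for x in range(len(station_layout)):
--         running += delta.get(x, 0)
--         total += running
--     return total
-- ===== Notes on version B (the rewrite author's own statement) =====
-- stated objective: alternative
-- what changed: Replaces direct accumulation of |index - target| per move by a difference-array/sweep algorithm: each move marks +1/-1 at its interval endpoints in a delta dict, and one prefix-sum sweep over the layout cells counts each move's span length.
import Mathlib
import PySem

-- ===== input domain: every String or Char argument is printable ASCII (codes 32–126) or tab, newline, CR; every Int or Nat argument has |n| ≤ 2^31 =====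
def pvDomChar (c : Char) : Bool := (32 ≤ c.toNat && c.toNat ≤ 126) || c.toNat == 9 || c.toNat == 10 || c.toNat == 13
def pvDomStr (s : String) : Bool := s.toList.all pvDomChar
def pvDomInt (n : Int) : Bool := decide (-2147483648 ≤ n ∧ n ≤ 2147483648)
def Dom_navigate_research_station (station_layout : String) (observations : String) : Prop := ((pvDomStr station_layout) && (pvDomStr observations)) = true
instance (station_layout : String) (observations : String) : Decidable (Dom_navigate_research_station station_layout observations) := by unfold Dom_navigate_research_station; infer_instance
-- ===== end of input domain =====

-- B replaces A's direct |index - target| accumulation by a difference-dict + prefix-sum sweep over layout cells (alternative algorithm, same cost); proven equal on all inputs.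


-- ===== PORT A =====
def navigate_research_station (station_layout : String) (observations : String) : Int :=
  -- my_dict[char] = index, overwriting (last occurrence wins)
  let my_dict := (PySem.List.enumerate station_layout.toList 0).foldl
    (fun d p => d.insert p.2 p.1) PySem.Dict.empty
  -- state = (total_sum, index)
  (observations.toList.foldl
      (fun (st : Int × Int) c =>
        match my_dict.get? c with
        | some v => (st.1 + |st.2 - v|, v)
        | none => st)
      (0, 0)).1

-- ===== PORT B =====
-- B-side helpers: last-index dict (same overwriting loop as the Python), and the
-- delta-marking loop body (delta[lo] += 1; delta[hi] -= 1; pos = j)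
def pvLastIdx (l : List Char) : PySem.Dict Char Int :=
  (PySem.List.enumerate l 0).foldl (fun d p => d.insert p.2 p.1) PySem.Dict.empty

def pvBStep (dC : PySem.Dict Char Int) (st : PySem.Dict Int Int × Int) (c : Char) :
    PySem.Dict Int Int × Int :=
  match dC.get? c with
  | some j =>
    let lo := if st.2 ≤ j then st.2 else j
    let hi := if st.2 ≤ j then j else st.2
    let d1 := st.1.insert lo (st.1.getD lo 0 + 1)
    (d1.insert hi (d1.getD hi 0 - 1), j)
  | none => st

def navigate_research_station_alt (station_layout : String) (observations : String) : Int :=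
  let last := pvLastIdx station_layout.toList
  -- state = (delta, pos)
  let st := observations.toList.foldl (pvBStep last) (PySem.Dict.empty, 0)
  -- prefix-sum sweep over the cells; state = (total, running)
  ((PySem.List.pyRange 0 (Int.ofNat station_layout.toList.length) 1).foldl
      (fun (acc : Int × Int) x => (acc.1 + (acc.2 + st.1.getD x 0), acc.2 + st.1.getD x 0))
      (0, 0)).1

-- ===== PRECONDITION & SPEC =====
def Spec_navigate_research_station (station_layout : String) (observations : String) (out : Int) : Prop := out = navigate_research_station_alt station_layout observations
instance (station_layout : String) (observations : String) (out : Int) : Decidable (Spec_navigate_research_station station_layout observations out) := by unfold Spec_navigate_research_station; infer_instance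

-- ===== CLAIM =====
def Claim_equal_navigate_research_station : Prop := ∀ (station_layout : String) (observations : String), Dom_navigate_research_station station_layout observations → Spec_navigate_research_station station_layout observations (navigate_research_station station_layout observations)

-- ===== LEMMAS AND PROOFS =====

-- the common mathematical value: sum of |moves| under dict d starting at position i
def pvS (d : PySem.Dict Char Int) : Int → List Char → Int
  | _, [] => 0
  | i, c :: cs =>
    match d.get? c with
    | some v => |i - v| + pvS d v cs
    | none => pvS d i cs

-- A's loop computes pvS
theorem pvA_loop (d : PySem.Dict Char Int) (cs : List Char) (t i : Int) :
    (cs.foldl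
      (fun (st : Int × Int) c =>
        match d.get? c with
        | some v => (st.1 + |st.2 - v|, v)
        | none => st)
      (t, i)).1 = t + pvS d i cs := by
  induction cs generalizing t i with
  | nil => simp [pvS]
  | cons c cs ih =>
    simp only [List.foldl_cons, pvS]
    cases h : d.get? c with
    | none => exact ih t i
    | some v => rw [ih (t + |i - v|) v]; ring

-- B's sweep: running total of g over [0, n)
def pvSweep (g : Int → Int) (n : Nat) : Int × Int :=
  (PySem.List.pyRange 0 (Int.ofNat n) 1).foldl
    (fun (acc : Int × Int) x => (acc.1 + (acc.2 + g x), acc.2 + g x)) (0, 0)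

theorem pvSweep_succ (g : Int → Int) (n : Nat) :
    pvSweep g (n + 1) =
      ((pvSweep g n).1 + ((pvSweep g n).2 + g n), (pvSweep g n).2 + g n) := by
  unfold pvSweep
  have e : (Int.ofNat (n + 1)) = Int.ofNat n + 1 := rfl
  rw [e, PySem.List.pyRange_one_succ_right (by exact Int.natCast_nonneg n), List.foldl_append]
  simp

-- pointwise update of g at k by δ shifts the sweep: running by δ, total by δ*(n-k)
theorem pvSweep_update (g g' : Int → Int) (k δ : Int)
    (hg : ∀ x, g' x = if x = k then g k + δ else g x) (hk : 0 ≤ k) :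
    ∀ n : Nat,
      (pvSweep g' n).2 = (pvSweep g n).2 + (if k < (n : Int) then δ else 0) ∧
      (pvSweep g' n).1 = (pvSweep g n).1 + (if k < (n : Int) then δ * ((n : Int) - k) else 0) := by
  intro n
  induction n with
  | zero =>
    constructor <;> · simp [pvSweep, PySem.List.pyRange]; omega
  | succ n ih =>
    obtain ⟨ih2, ih1⟩ := ih
    have hc : ((n + 1 : Nat) : Int) = (n : Int) + 1 := by push_cast; ring
    rw [pvSweep_succ, pvSweep_succ, hg, ih1, ih2, hc]
    by_cases hnk : ((n : Nat) : Int) = k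
    · subst hnk
      constructor <;> · simp; try ring
    · by_cases hlt : k < ((n : Nat) : Int)
      · have h2 : k < ((n : Nat) : Int) + 1 := by omega
        constructor
        · simp [if_neg hnk, hlt, h2]; ring
        · simp [if_neg hnk, hlt, h2]
          rw [show δ * ((n : Int) + 1 - k) = δ * ((n : Int) - k) + δ from by ring]; ring
      · have h2 : ¬ k < ((n : Nat) : Int) + 1 := by omega
        constructor <;> · simp [if_neg hnk, hlt, h2]; try ring

-- the sweep of the empty delta dict is zero
theorem pvSweep_const_zero (n : Nat) :
    (pvSweep (fun _ => (0 : Int)) n).1 = 0 ∧ (pvSweep (fun _ => (0 : Int)) n).2 = 0 := by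
  induction n with
  | zero => constructor <;> rfl
  | succ n ih => rw [pvSweep_succ]; simp [ih.1, ih.2]

theorem pvSweep_zero (n : Nat) :
    (pvSweep (fun x => (PySem.Dict.empty : PySem.Dict Int Int).getD x 0) n).1 = 0 := by
  have he : (fun x => (PySem.Dict.empty : PySem.Dict Int Int).getD x 0) = (fun _ => (0 : Int)) := by
    funext x; simp [PySem.Dict.getD_empty]
  rw [he]
  exact (pvSweep_const_zero n).1

-- values stored by the enumerate-insert loop satisfy P if all first components do
theorem pvDict_val (l : List (Int × Char)) (d : PySem.Dict Char Int) (P : Int → Prop)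
    (hd : ∀ c v, d.get? c = some v → P v) (hl : ∀ p ∈ l, P p.1) :
    ∀ c v, (l.foldl (fun d p => d.insert p.2 p.1) d).get? c = some v → P v := by
  induction l generalizing d with
  | nil => exact hd
  | cons p l ih =>
    simp only [List.foldl_cons]
    refine ih _ ?_ (fun q hq => hl q (by simp [hq]))
    intro c v h
    rw [PySem.Dict.get?_insert] at h
    split_ifs at h with hc
    · cases h; exact hl p (by simp)
    · exact hd c v h

-- B's observation loop: total of the sweep grows by exactly pvS
theorem pvB_loop (dC : PySem.Dict Char Int) (L : Nat)
    (hval : ∀ c v, dC.get? c = some v → 0 ≤ v ∧ v < (L : Int))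
    (cs : List Char) :
    ∀ (dD : PySem.Dict Int Int) (pos : Int), 0 ≤ pos → pos < (L : Int) →
    (pvSweep (fun x => ((cs.foldl (pvBStep dC) (dD, pos)).1.getD x 0)) L).1
    = (pvSweep (fun x => dD.getD x 0) L).1 + pvS dC pos cs := by
  induction cs with
  | nil => intro dD pos _ _; simp [pvS]
  | cons c cs ih =>
    intro dD pos hpos0 hposL
    simp only [List.foldl_cons, pvS, pvBStep]
    cases h : dC.get? c with
    | none => exact ih dD pos hpos0 hposL
    | some j =>
      obtain ⟨hj0, hjL⟩ := hval c j h
      simp only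
      set lo := if pos ≤ j then pos else j with hlo
      set hi := if pos ≤ j then j else pos with hhi
      set d1 := dD.insert lo (dD.getD lo 0 + 1) with hd1
      set d2 := d1.insert hi (d1.getD hi 0 - 1) with hd2
      rw [ih d2 j hj0 hjL]
      have hlo0 : 0 ≤ lo := by rw [hlo]; split_ifs <;> omega
      have hhi0 : 0 ≤ hi := by rw [hhi]; split_ifs <;> omega
      have hloL : lo < (L : Int) := by rw [hlo]; split_ifs <;> omega
      have hhiL : hi < (L : Int) := by rw [hhi]; split_ifs <;> omega
      have h1 : ∀ x, d1.getD x 0 = if x = lo then dD.getD lo 0 + 1 else dD.getD x 0 := by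
        intro x; rw [hd1, PySem.Dict.getD_insert]
      have h2 : ∀ x, d2.getD x 0 = if x = hi then d1.getD hi 0 + (-1) else d1.getD x 0 := by
        intro x; rw [hd2, PySem.Dict.getD_insert]; split_ifs <;> ring
      have s1 := (pvSweep_update _ _ lo 1 h1 hlo0 L).2
      have s2 := (pvSweep_update _ _ hi (-1) h2 hhi0 L).2
      rw [s2, s1, if_pos hloL, if_pos hhiL]
      have habs : |pos - j| = hi - lo := by
        rw [hhi, hlo]; split_ifs with hle
        · rw [abs_of_nonpos (by omega)]; ring
        · rw [abs_of_nonneg (by omega)]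
      rw [habs]; ring

-- the A-loop over the empty dict moves nowhere
theorem pvS_empty (cs : List Char) (i : Int) :
    pvS (PySem.Dict.empty) i cs = 0 := by
  induction cs generalizing i with
  | nil => rfl
  | cons c cs ih => simp [pvS, PySem.Dict.get?_empty, ih]

-- the whole equivalence, over lists
theorem pvMain (l obs : List Char) :
    (obs.foldl
      (fun (st : Int × Int) c =>
        match (pvLastIdx l).get? c with
        | some v => (st.1 + |st.2 - v|, v)
        | none => st) (0, 0)).1
    = (pvSweep (fun x => ((obs.foldl (pvBStep (pvLastIdx l)) (PySem.Dict.empty, 0)).1.getD x 0))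
        l.length).1 := by
  rw [pvA_loop (pvLastIdx l) obs 0 0]
  cases hl : l with
  | nil =>
    have hde : pvLastIdx ([] : List Char) = PySem.Dict.empty := rfl
    rw [hde, pvS_empty]
    have hfold : (obs.foldl (pvBStep PySem.Dict.empty) (PySem.Dict.empty, 0)) = (PySem.Dict.empty, 0) := by
      induction obs with
      | nil => rfl
      | cons c cs ih => simp [pvBStep, PySem.Dict.get?_empty, ih]
    rw [hfold]
    simp only [List.length_nil]
    rw [pvSweep_zero 0]
    omega
  | cons a as =>
    have hval : ∀ c v, (pvLastIdx (a :: as)).get? c = some v →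
        0 ≤ v ∧ v < (((a :: as).length : Nat) : Int) := by
      refine pvDict_val _ _ _ (by simp [PySem.Dict.get?_empty]) ?_
      intro p hp
      rw [PySem.List.mem_enumerate_iff] at hp
      obtain ⟨k, hk, rfl⟩ := hp
      constructor <;> push_cast <;> omega
    have hL : (0 : Int) < (((a :: as).length : Nat) : Int) := by
      simp
    rw [pvB_loop (pvLastIdx (a :: as)) (a :: as).length hval obs PySem.Dict.empty 0 le_rfl hL]
    rw [pvSweep_zero (a :: as).length]

-- ===== VERDICT =====
theorem navigate_research_station_spec : Claim_equal_navigate_research_station := by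
  intro s o _
  show navigate_research_station s o = navigate_research_station_alt s o
  exact pvMain s.toList o.toList
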